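-- pv_equiv track=rewrite | github.com/Abdelrahman-ibrahem-elfiky/Disk_Scheduling-GUI | main.py | LOOK_Outword
-- ===== SOURCE A (Python) =====
-- def LOOK_Outword(Request, Start):
--     n = len(Request)
--     Order = []
--     i = Start - 1
--     Order.append(Start)
--     while i > 0:
--         for j in range(0,n):
--             if(Request[j] == i):
--                 Order.append(i)
--         i -= 1
--
--     k = Start + 1
--     while k < 200:
--         for l in range(0,n):
--             if(Request[l] == k):
--                 Order.append(k)
--         k += 1
--
--     Sum = 0
--     for p in range(0,len(Order) - 1):
--         Sum += abs(Order[p] - Order[p+1])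
--     return Order, Sum
-- ===== SOURCE B (Python) =====
-- def LOOK_Outword(Request, Start):
--     below = sorted(r for r in Request if 0 < r < Start)
--     above = sorted(r for r in Request if Start < r < 200)
--     order = [Start] + list(reversed(below)) + above
--     total = sum(abs(a - b) for a, b in zip(order, order[1:]))
--     return order, total
-- ===== Notes on version B (the rewrite author's own statement) =====
-- stated objective: faster
-- what changed: Replaces A's outward scan over every cylinder value (Start-1 down to 1, then Start+1 up to 199, rescanning the whole request list at each value) with a single partition pass into below/above Start followed by two sorts and one zip for the seek sum.
import Mathlib
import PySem

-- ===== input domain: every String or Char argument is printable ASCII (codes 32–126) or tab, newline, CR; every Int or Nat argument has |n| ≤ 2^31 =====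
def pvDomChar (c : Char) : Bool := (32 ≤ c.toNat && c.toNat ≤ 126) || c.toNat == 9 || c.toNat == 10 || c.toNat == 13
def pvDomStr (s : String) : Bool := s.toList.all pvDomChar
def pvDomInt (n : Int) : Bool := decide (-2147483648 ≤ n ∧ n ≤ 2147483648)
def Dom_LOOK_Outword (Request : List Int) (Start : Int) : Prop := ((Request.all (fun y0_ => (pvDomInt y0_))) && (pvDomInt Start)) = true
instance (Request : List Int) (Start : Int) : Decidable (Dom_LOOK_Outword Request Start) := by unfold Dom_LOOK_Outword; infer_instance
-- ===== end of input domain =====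

-- B replaces A's 200-step outward scan (each step rescanning the whole request list)
-- by one partition pass plus two sorts; objective: faster (O((n+200)·n) → O(n log n)).

-- ===== PORT A =====
-- 'while i > 0: for j in range(n): if Request[j] == i: Order.append(i); i -= 1'
def pvDownLoop (Request : List Int) (i : Int) (Order : List Int) : List Int :=
  if i > 0 then
    pvDownLoop Request (i - 1)
      (Request.foldl (fun acc r => if r == i then acc ++ [i] else acc) Order)
  else Order
termination_by i.toNat
decreasing_by omega

-- 'while k < 200: for l in range(n): if Request[l] == k: Order.append(k); k += 1'
def pvUpLoop (Request : List Int) (k : Int) (Order : List Int) : List Int :=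
  if k < 200 then
    pvUpLoop Request (k + 1)
      (Request.foldl (fun acc r => if r == k then acc ++ [k] else acc) Order)
  else Order
termination_by (200 - k).toNat
decreasing_by omega

def LOOK_Outword (Request : List Int) (Start : Int) : List Int × Int :=
  let Order := pvDownLoop Request (Start - 1) [Start]
  let Order := pvUpLoop Request (Start + 1) Order
  let Sum := (PySem.List.pyRange 0 ((Order.length : Int) - 1) 1).foldl
    (fun s p => s + |PySem.List.pyGetD Order p 0 - PySem.List.pyGetD Order (p + 1) 0|) 0
  (Order, Sum)

-- ===== PORT B =====
def LOOK_Outword_alt (Request : List Int) (Start : Int) : List Int × Int :=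
  let below := PySem.List.sorted (Request.filter (fun r => decide (0 < r) && decide (r < Start))) (fun x => x) false
  let above := PySem.List.sorted (Request.filter (fun r => decide (Start < r) && decide (r < 200))) (fun x => x) false
  let order := [Start] ++ below.reverse ++ above
  let total := (order.zip order.tail).foldl (fun s ab => s + |ab.1 - ab.2|) 0
  (order, total)

-- ===== PRECONDITION & SPEC =====
def Spec_LOOK_Outword (Request : List Int) (Start : Int) (out : List Int × Int) : Prop := out = LOOK_Outword_alt Request Start
instance (Request : List Int) (Start : Int) (out : List Int × Int) : Decidable (Spec_LOOK_Outword Request Start out) := by unfold Spec_LOOK_Outword; infer_instance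

-- ===== CLAIM (what is proved, stated in full; the proofs are below) =====
def Claim_equal_LOOK_Outword : Prop := ∀ (Request : List Int) (Start : Int), Dom_LOOK_Outword Request Start → Spec_LOOK_Outword Request Start (LOOK_Outword Request Start)

-- ===== LEMMAS AND PROOFS =====

-- values collected by the downward scan, in scan order (proof-side helper)
def pvDownAux (Request : List Int) (i : Int) : List Int :=
  if i > 0 then Request.filter (fun r => r == i) ++ pvDownAux Request (i - 1) else []
termination_by i.toNat
decreasing_by omega

def pvUpAux (Request : List Int) (k : Int) : List Int :=
  if k < 200 then Request.filter (fun r => r == k) ++ pvUpAux Request (k + 1) else []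
termination_by (200 - k).toNat
decreasing_by omega

theorem pvInner_eq (Request : List Int) (i : Int) (acc : List Int) :
    Request.foldl (fun acc r => if r == i then acc ++ [i] else acc) acc
      = acc ++ Request.filter (fun r => r == i) := by
  have h := PySem.List.foldl_append_if (l := Request) (p := fun r => r == i) (f := fun _ => i) (acc := acc)
  rw [h]
  congr 1
  conv_rhs => rw [← List.map_id (Request.filter (fun r => r == i))]
  apply List.map_congr_left
  intro x hx
  have hx2 : x = i := by simpa using List.of_mem_filter hx
  simp [hx2]

theorem pvDownLoop_eq_aux (Request : List Int) : ∀ (n : Nat) (i : Int), i.toNat = n →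
    ∀ acc, pvDownLoop Request i acc = acc ++ pvDownAux Request i := by
  intro n
  induction n with
  | zero =>
      intro i hi acc
      rw [pvDownLoop, pvDownAux]
      have h : ¬ i > 0 := by omega
      simp [h]
  | succ m ih =>
      intro i hi acc
      rw [pvDownLoop, pvDownAux]
      have h : i > 0 := by omega
      simp only [if_pos h]
      rw [ih (i - 1) (by omega), pvInner_eq, List.append_assoc]

theorem pvDownLoop_eq (Request : List Int) (i : Int) (acc : List Int) :
    pvDownLoop Request i acc = acc ++ pvDownAux Request i :=
  pvDownLoop_eq_aux Request i.toNat i rfl acc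

theorem pvUpLoop_eq_aux (Request : List Int) : ∀ (n : Nat) (k : Int), (200 - k).toNat = n →
    ∀ acc, pvUpLoop Request k acc = acc ++ pvUpAux Request k := by
  intro n
  induction n with
  | zero =>
      intro k hk acc
      rw [pvUpLoop, pvUpAux]
      have h : ¬ k < 200 := by omega
      simp [h]
  | succ m ih =>
      intro k hk acc
      rw [pvUpLoop, pvUpAux]
      have h : k < 200 := by omega
      simp only [if_pos h]
      rw [ih (k + 1) (by omega), pvInner_eq, List.append_assoc]

theorem pvUpLoop_eq (Request : List Int) (k : Int) (acc : List Int) :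
    pvUpLoop Request k acc = acc ++ pvUpAux Request k :=
  pvUpLoop_eq_aux Request (200 - k).toNat k rfl acc

-- a filter splits as a permutation along a disjoint cover of its predicate
theorem pvFilter_partition (l : List Int) (p q r : Int → Bool)
    (hc : ∀ x, p x = (q x || r x)) (hd : ∀ x, ¬(q x = true ∧ r x = true)) :
    (l.filter p).Perm (l.filter q ++ l.filter r) := by
  induction l with
  | nil => simp
  | cons a t ih =>
      by_cases hq : q a = true
      · have hp : p a = true := by rw [hc]; simp [hq]
        have hr : r a = false := by
          rcases Bool.eq_false_or_eq_true (r a) with h | h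
          · exact absurd ⟨hq, h⟩ (hd a)
          · exact h
        simpa [List.filter_cons, hp, hq, hr] using ih.cons a
      · have hq' : q a = false := by simpa using hq
        by_cases hr : r a = true
        · have hp : p a = true := by rw [hc]; simp [hr]
          simp only [List.filter_cons, hp, hq', hr, if_pos, Bool.false_eq_true]
          exact (ih.cons a).trans List.perm_middle.symm
        · have hr' : r a = false := by simpa using hr
          have hp : p a = false := by rw [hc]; simp [hq', hr']
          simpa [List.filter_cons, hp, hq', hr'] using ih

theorem pvDownAux_perm (Request : List Int) (i : Int) :
    (pvDownAux Request i).Perm (Request.filter (fun r => decide (0 < r) && decide (r ≤ i))) := by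
  fun_induction pvDownAux Request i with
  | case1 i h ih =>
      refine (List.Perm.append_left _ ih).trans ?_
      refine ((pvFilter_partition Request (fun r => decide (0 < r) && decide (r ≤ i))
        (fun r => r == i) (fun r => decide (0 < r) && decide (r ≤ i - 1)) ?_ ?_).symm)
      · intro x
        rw [Bool.eq_iff_iff]
        simp only [Bool.or_eq_true, Bool.and_eq_true, decide_eq_true_eq, beq_iff_eq]
        omega
      · intro x
        simp only [Bool.and_eq_true, decide_eq_true_eq, beq_iff_eq]
        rintro ⟨rfl, _, h2⟩; omega
  | case2 i h =>
      have : Request.filter (fun r => decide (0 < r) && decide (r ≤ i)) = [] := by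
        apply List.filter_eq_nil_iff.mpr
        intro a _; simp only [Bool.and_eq_true, decide_eq_true_eq]; rintro ⟨h1, h2⟩; omega
      simp [this]

theorem pvUpAux_perm (Request : List Int) (k : Int) :
    (pvUpAux Request k).Perm (Request.filter (fun r => decide (k ≤ r) && decide (r < 200))) := by
  fun_induction pvUpAux Request k with
  | case1 k h ih =>
      refine (List.Perm.append_left _ ih).trans ?_
      refine ((pvFilter_partition Request (fun r => decide (k ≤ r) && decide (r < 200))
        (fun r => r == k) (fun r => decide (k + 1 ≤ r) && decide (r < 200)) ?_ ?_).symm)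
      · intro x
        rw [Bool.eq_iff_iff]
        simp only [Bool.or_eq_true, Bool.and_eq_true, decide_eq_true_eq, beq_iff_eq]
        omega
      · intro x
        simp only [Bool.and_eq_true, decide_eq_true_eq, beq_iff_eq]
        rintro ⟨rfl, h2, _⟩; omega
  | case2 k h =>
      have : Request.filter (fun r => decide (k ≤ r) && decide (r < 200)) = [] := by
        apply List.filter_eq_nil_iff.mpr
        intro a _; simp only [Bool.and_eq_true, decide_eq_true_eq]; rintro ⟨h1, h2⟩; omega
      simp [this]

theorem pvDownAux_mem (Request : List Int) (i : Int) (x : Int) (hx : x ∈ pvDownAux Request i) :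
    0 < x ∧ x ≤ i := by
  have := (pvDownAux_perm Request i).mem_iff.mp hx
  have := List.of_mem_filter this
  simpa using this

theorem pvUpAux_mem (Request : List Int) (k : Int) (x : Int) (hx : x ∈ pvUpAux Request k) :
    k ≤ x ∧ x < 200 := by
  have := (pvUpAux_perm Request k).mem_iff.mp hx
  have := List.of_mem_filter this
  simpa using this

theorem pvDownAux_pairwise (Request : List Int) (i : Int) :
    (pvDownAux Request i).Pairwise (fun a b => b ≤ a) := by
  fun_induction pvDownAux Request i with
  | case1 i h ih =>
      apply List.pairwise_append.mpr
      refine ⟨?_, ih, ?_⟩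
      · apply List.pairwise_of_forall_mem_list
        intro a ha b hb
        have ha' := List.of_mem_filter ha
        have hb' := List.of_mem_filter hb
        simp only [beq_iff_eq] at ha' hb'
        omega
      · intro a ha b hb
        have ha' := List.of_mem_filter ha
        simp only [beq_iff_eq] at ha'
        have hb' := pvDownAux_mem Request (i - 1) b hb
        omega
  | case2 i h => simp

theorem pvUpAux_pairwise (Request : List Int) (k : Int) :
    (pvUpAux Request k).Pairwise (fun a b => a ≤ b) := by
  fun_induction pvUpAux Request k with
  | case1 k h ih =>
      apply List.pairwise_append.mpr
      refine ⟨?_, ih, ?_⟩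
      · apply List.pairwise_of_forall_mem_list
        intro a ha b hb
        have ha' := List.of_mem_filter ha
        have hb' := List.of_mem_filter hb
        simp only [beq_iff_eq] at ha' hb'
        omega
      · intro a ha b hb
        have ha' := List.of_mem_filter ha
        simp only [beq_iff_eq] at ha'
        have hb' := pvUpAux_mem Request (k + 1) b hb
        omega
  | case2 k h => simp

theorem pvBelow_eq (Request : List Int) (Start : Int) :
    (PySem.List.sorted (Request.filter (fun r => decide (0 < r) && decide (r < Start))) (fun x => x) false).reverse
      = pvDownAux Request (Start - 1) := by
  have hfe : Request.filter (fun r => decide (0 < r) && decide (r ≤ Start - 1))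
      = Request.filter (fun r => decide (0 < r) && decide (r < Start)) := by
    apply List.filter_congr
    intro x _
    congr 1
    rw [decide_eq_decide]
    omega
  have hperm : ((pvDownAux Request (Start - 1)).reverse).Perm
      (Request.filter (fun r => decide (0 < r) && decide (r < Start))) := by
    refine (List.reverse_perm _).trans ?_
    rw [← hfe]; exact pvDownAux_perm Request (Start - 1)
  have hpw : ((pvDownAux Request (Start - 1)).reverse).Pairwise (fun a b => a ≤ b) := by
    rw [List.pairwise_reverse]
    exact pvDownAux_pairwise Request (Start - 1)
  have := PySem.List.sorted_id_eq_of_perm_of_pairwise _ _ hperm hpw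
  rw [this, List.reverse_reverse]

theorem pvAbove_eq (Request : List Int) (Start : Int) :
    PySem.List.sorted (Request.filter (fun r => decide (Start < r) && decide (r < 200))) (fun x => x) false
      = pvUpAux Request (Start + 1) := by
  have hfe : Request.filter (fun r => decide (Start + 1 ≤ r) && decide (r < 200))
      = Request.filter (fun r => decide (Start < r) && decide (r < 200)) := by
    apply List.filter_congr
    intro x _
    congr 1
  have hperm : (pvUpAux Request (Start + 1)).Perm
      (Request.filter (fun r => decide (Start < r) && decide (r < 200))) := by
    rw [← hfe]; exact pvUpAux_perm Request (Start + 1)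
  exact PySem.List.sorted_id_eq_of_perm_of_pairwise _ _ hperm (pvUpAux_pairwise Request (Start + 1))

-- the index-based adjacent-difference sum equals the zip-based one, for any list
theorem pvZip_tail_eq (l : List Int) :
    l.zip l.tail = (List.range (l.length - 1)).map (fun p => (l.getD p 0, l.getD (p + 1) 0)) := by
  apply List.ext_getElem
  · simp [List.length_zip]
  · intro n h1 h2
    simp only [List.length_zip, List.length_tail] at h1
    have hn : n + 1 < l.length := by omega
    simp [List.getElem_zip, List.getElem_tail, hn, Nat.lt_of_succ_lt hn]

theorem pvSum_eq (l : List Int) :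
    (PySem.List.pyRange 0 ((l.length : Int) - 1) 1).foldl
        (fun s p => s + |PySem.List.pyGetD l p 0 - PySem.List.pyGetD l (p + 1) 0|) 0
      = (l.zip l.tail).foldl (fun s ab => s + |ab.1 - ab.2|) 0 := by
  cases l with
  | nil => simp [PySem.List.pyRange]
  | cons a t =>
      rw [pvZip_tail_eq, List.foldl_map]
      have hcast : (((a :: t).length : Int) - 1) = (((a :: t).length - 1 : Nat) : Int) := by
        simp
      rw [hcast, PySem.List.pyRange_zero_natCast, List.foldl_map]
      apply List.foldl_ext
      intro s p _
      have h1 : ((p : Int) + 1) = ((p + 1 : Nat) : Int) := by push_cast; ring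
      rw [h1, PySem.List.pyGetD_natCast, PySem.List.pyGetD_natCast]

theorem LOOK_Outword_spec : Claim_equal_LOOK_Outword := by
  intro Request Start _
  unfold Spec_LOOK_Outword LOOK_Outword LOOK_Outword_alt
  simp only
  rw [pvDownLoop_eq, pvUpLoop_eq, pvBelow_eq, pvAbove_eq, pvSum_eq, List.append_assoc]
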